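-- pv_equiv track=rewrite | github.com/jpegame/Atividades_ADS | lista_funcao/exercicio15list6.py | e_numero_real
-- ===== SOURCE A (Python) =====
-- def e_numero_real(valor):
--
--     if not valor:
--         return False
--     if valor[0] == '-' and len(valor) > 1:  # Permite números negativos
--         valor = valor[1:]
--     partes = valor.split('.')
--     if len(partes) > 2:  # Mais de um ponto decimal
--         return False
--     for parte in partes:
--         if not parte.isdigit():  # Verifica se cada parte é composta apenas por dígitos
--             return False
--     return True
-- ===== SOURCE B (Python) =====
-- def e_numero_real(valor):
--     if not valor:
--         return False
--     s = valor[1:] if valor[0] == '-' and len(valor) > 1 else valor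
--     dots = 0
--     seg = 0
--     for c in s:
--         if c == '.':
--             if dots == 1 or seg == 0:
--                 return False
--             dots = 1
--             seg = 0
--         elif c.isdigit():
--             seg += 1
--         else:
--             return False
--     return seg > 0
-- ===== Notes on version B (the rewrite author's own statement) =====
-- stated objective: alternative
-- what changed: Replaces splitting on the decimal point into a parts list plus per-part isdigit checks by a single left-to-right scan maintaining a dot counter and the current segment length.
import Mathlib
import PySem

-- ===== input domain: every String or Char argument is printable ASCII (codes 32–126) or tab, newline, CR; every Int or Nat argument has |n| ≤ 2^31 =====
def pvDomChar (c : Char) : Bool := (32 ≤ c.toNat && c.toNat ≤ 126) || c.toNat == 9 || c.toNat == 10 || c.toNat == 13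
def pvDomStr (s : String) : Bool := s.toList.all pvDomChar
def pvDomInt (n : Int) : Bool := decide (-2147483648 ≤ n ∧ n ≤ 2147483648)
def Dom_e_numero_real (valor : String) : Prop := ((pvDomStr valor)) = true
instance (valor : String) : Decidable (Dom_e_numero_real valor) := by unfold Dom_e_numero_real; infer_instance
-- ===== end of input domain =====

-- B replaces A's split('.')-into-parts check by a single left-to-right scan keeping a dot counter and the current segment length; same behaviour, same cost.


-- ===== PORT A =====
def e_numero_real (valor : String) : Bool :=
  if valor.toList = [] then false
  else
    let cs :=
      if PySem.List.pyGet? valor.toList 0 = some '-' ∧ 1 < valor.toList.length then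
        PySem.List.slice valor.toList (some 1) none
      else valor.toList
    let partes := PySem.Chars.splitOn cs ['.']
    if 2 < partes.length then false
    else partes.all (fun p => PySem.Chars.strIsdigit p)

-- ===== PORT B =====
-- the scan: dots = number of '.' seen so far, seg = length of the current digit segment
def pvScan : List Char → Nat → Nat → Bool
  | [], _, seg => decide (0 < seg)
  | c :: rest, dots, seg =>
    if c = '.' then
      if dots == 1 || seg == 0 then false else pvScan rest 1 0
    else if PySem.Chars.isdigit c then pvScan rest dots (seg + 1)
    else false

def e_numero_real_alt (valor : String) : Bool :=
  if valor.toList = [] then false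
  else
    let s :=
      if PySem.List.pyGet? valor.toList 0 = some '-' ∧ 1 < valor.toList.length then
        PySem.List.slice valor.toList (some 1) none
      else valor.toList
    pvScan s 0 0

-- ===== PRECONDITION & SPEC =====
def Spec_e_numero_real (valor : String) (out : Bool) : Prop := out = e_numero_real_alt valor
instance (valor : String) (out : Bool) : Decidable (Spec_e_numero_real valor out) := by unfold Spec_e_numero_real; infer_instance

-- ===== CLAIM (what is proved, stated in full; the proofs are below) =====
def Claim_equal_e_numero_real : Prop := ∀ (valor : String), Dom_e_numero_real valor → Spec_e_numero_real valor (e_numero_real valor)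

-- ===== LEMMAS AND PROOFS =====

-- structural version of split on a single '.' separator
def pvSplitDot : List Char → List (List Char)
  | [] => [[]]
  | c :: rest => if c = '.' then [] :: pvSplitDot rest else (pvSplitDot rest).modifyHead (c :: ·)

theorem pvSplitDot_ne_nil (l : List Char) : pvSplitDot l ≠ [] := by
  cases l with
  | nil => simp [pvSplitDot]
  | cons c rest =>
    simp only [pvSplitDot]
    split
    · simp
    · cases h : pvSplitDot rest with
      | nil => exact absurd h (pvSplitDot_ne_nil rest)
      | cons p ps => simp

theorem splitOn_go_eq : ∀ (fuel : Nat) (l cur : List Char) (acc : List (List Char)),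
    l.length ≤ fuel →
    PySem.Chars.splitOn.go ['.'] fuel l cur acc
      = acc.reverse ++ (pvSplitDot l).modifyHead (cur.reverse ++ ·) := by
  intro fuel
  induction fuel with
  | zero =>
    intro l cur acc h
    have hl : l = [] := by cases l <;> simp_all
    subst hl
    simp [PySem.Chars.splitOn.go, pvSplitDot]
  | succ n ih =>
    intro l cur acc h
    cases l with
    | nil => simp [PySem.Chars.splitOn.go, pvSplitDot]
    | cons c rest =>
      simp only [PySem.Chars.splitOn.go]
      by_cases hc : c = '.'
      · subst hc
        have hpre : List.isPrefixOf ['.'] ('.' :: rest) = true := by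
          simp [List.isPrefixOf]
        rw [if_pos hpre]
        simp only [List.length_singleton, List.drop_succ_cons, List.drop_zero]
        simp only [List.length_cons] at h
        rw [ih _ _ _ (by omega)]
        simp only [pvSplitDot]
        cases pvSplitDot rest <;> simp
      · have hpre : List.isPrefixOf ['.'] (c :: rest) = false := by
          simp [List.isPrefixOf]
          exact fun hh => absurd hh.symm hc
        rw [if_neg (by simp [hpre])]
        simp only [List.length_cons] at h
        rw [ih _ _ _ (by omega)]
        simp only [pvSplitDot, if_neg hc]
        cases hs : pvSplitDot rest with
        | nil => exact absurd hs (pvSplitDot_ne_nil rest)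
        | cons p ps => simp

theorem splitOn_eq_pvSplitDot (l : List Char) :
    PySem.Chars.splitOn l ['.'] = pvSplitDot l := by
  unfold PySem.Chars.splitOn
  rw [splitOn_go_eq (l.length + 1) l [] [] (by omega)]
  cases h : pvSplitDot l with
  | nil => exact absurd h (pvSplitDot_ne_nil l)
  | cons p ps => simp

-- what pvScan computes on the parts list
def pvG : Nat → Nat → List (List Char) → Bool
  | _, seg, [p] => decide (0 < seg + p.length) && p.all PySem.Chars.isdigit
  | dots, seg, p :: q :: ps =>
      p.all PySem.Chars.isdigit && !(dots == 1) && decide (0 < seg + p.length) && pvG 1 0 (q :: ps)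
  | _, _, [] => false

theorem pvScan_eq_pvG (l : List Char) : ∀ (dots seg : Nat),
    pvScan l dots seg = pvG dots seg (pvSplitDot l) := by
  induction l with
  | nil => intro dots seg; simp [pvScan, pvSplitDot, pvG]
  | cons c rest ih =>
    intro dots seg
    by_cases hc : c = '.'
    · subst hc
      have hrest : pvSplitDot ('.' :: rest) = [] :: pvSplitDot rest := by simp [pvSplitDot]
      rw [hrest]
      cases hs : pvSplitDot rest with
      | nil => exact absurd hs (pvSplitDot_ne_nil rest)
      | cons q ps =>
        simp only [pvScan, pvG]
        by_cases h1 : dots == 1 || seg == 0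
        · rw [if_pos h1]
          simp only [Bool.or_eq_true, beq_iff_eq] at h1
          rcases h1 with h1 | h1 <;> simp [h1]
        · rw [if_neg h1]
          simp only [Bool.or_eq_true, beq_iff_eq, not_or] at h1
          rw [ih 1 0, hs]
          simp [h1.1, Nat.pos_of_ne_zero h1.2]
    · have hrest : pvSplitDot (c :: rest) = (pvSplitDot rest).modifyHead (c :: ·) := by
        simp [pvSplitDot, hc]
      rw [hrest]
      cases hs : pvSplitDot rest with
      | nil => exact absurd hs (pvSplitDot_ne_nil rest)
      | cons p ps =>
        simp only [List.modifyHead]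
        simp only [pvScan, if_neg hc]
        by_cases hd : PySem.Chars.isdigit c
        · rw [if_pos hd, ih dots (seg + 1), hs]
          cases ps with
          | nil =>
            simp only [pvG, List.all_cons, hd, Bool.true_and]
            have h1 : 0 < seg + (c :: p).length := by simp only [List.length_cons]; omega
            have h2 : 0 < seg + 1 + p.length := by omega
            simp [h2]
          | cons q ps' =>
            simp only [pvG, List.all_cons, hd, Bool.true_and]
            have h1 : (0 < seg + (c :: p).length) := by simp only [List.length_cons]; omega
            have h2 : (0 < seg + 1 + p.length) := by omega
            simp [h2, Bool.and_comm, Bool.and_left_comm]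
        · rw [if_neg hd]
          cases ps with
          | nil => simp [pvG, hd]
          | cons q ps' => simp [pvG, hd]

theorem pvG_eq_check (parts : List (List Char)) (hne : parts ≠ []) :
    pvG 0 0 parts
      = (if 2 < parts.length then false
         else parts.all (fun p => PySem.Chars.strIsdigit p)) := by
  match parts with
  | [] => exact absurd rfl hne
  | [p] =>
    cases p <;> simp [pvG, PySem.Chars.strIsdigit, Bool.and_comm]
  | [p, q] =>
    cases p <;> cases q <;>
      simp [pvG, PySem.Chars.strIsdigit, Bool.and_comm, Bool.and_left_comm, Bool.and_assoc]
  | p :: q :: r :: ps =>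
    rw [if_pos (by simp only [List.length_cons]; omega)]
    simp [pvG]

theorem core_eq (l : List Char) :
    (if 2 < (PySem.Chars.splitOn l ['.']).length then false
     else (PySem.Chars.splitOn l ['.']).all (fun p => PySem.Chars.strIsdigit p))
      = pvScan l 0 0 := by
  rw [splitOn_eq_pvSplitDot, pvScan_eq_pvG, pvG_eq_check _ (pvSplitDot_ne_nil l)]

-- ===== VERDICT (by name: the statement is the Claim_ definition above) =====
theorem e_numero_real_spec : Claim_equal_e_numero_real := by
  intro valor _
  unfold Spec_e_numero_real e_numero_real e_numero_real_alt
  by_cases h0 : valor.toList = []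
  · simp [h0]
  · rw [if_neg h0, if_neg h0]
    split <;> exact core_eq _
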